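-- pv_equiv track=rewrite | github.com/ffe4el/2022-1-python-class | 04.05 TUE/HW10/data.py | maximum_temp_gap
-- ===== SOURCE A (Python) =====
-- def maximum_temp_gap(dates, tmax, tmin):
--     # tmax[0] - tmin[0] = temp_gap [0]
--     # tmax[1] - tmin[1] = temp_gap [1] 만약 여기서 temp_gap[1]이 더 크다면 temp_gap_list에 넣고 temp_gap[0]은 버린다.
--     # tmax[2] - tmin[2] = temp_gap [2] 만약 여기서 temp_gap[1]이 더 크다면 temp_gap_list에 넣고 temp_gap[2]은 버린다.
--     # for i in range(365):
--     #     temp_gap = tmax[i] - tmin[i]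
--     #
--     # return temp_gap
--     # dates_list = []
--     # temp_gap_list = []
--     # max_gap = 0
--     # temp_gap = 0
--
--     # for row in data :
--     #     max_temp = float(row[3])
--     #     min_temp = float(row[5])
--     #     temp_gap = max_temp - (min_temp)
--
--     # tmax[0] - tmin[0] = temp_gap [0]
--     # tmax[1] - tmin[1] = temp_gap [1] 만약 여기서 temp_gap[1]이 더 크다면 temp_gap_list에 넣고 temp_gap[0]은 버린다.
--     # tmax[2] - tmin[2] = temp_gap [2] 만약 여기서 temp_gap[1]이 더 크다면 temp_gap_list에 넣고 temp_gap[2]은 버린다.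
--     length = len(dates)
--     temp_gap_list = []
--
--     for i in range(length):
--         temp_gap = tmax[i] - tmin[i]
--         temp_gap_list.append(temp_gap)
--
--         if temp_gap == max(temp_gap_list) :
--             p = i
--
--     return dates[p], max(temp_gap_list)
-- ===== SOURCE B (Python) =====
-- def maximum_temp_gap(dates, tmax, tmin):
--     g = [tmax[i] - tmin[i] for i in range(len(dates))]
--     p = max(range(len(g)), key=lambda i: (g[i], i))
--     return dates[p], g[p]
-- ===== Notes on version B (the rewrite author's own statement) =====
-- stated objective: faster
-- what changed: Build the gap list in one comprehension, then locate the last-maximal index with a single max(range, key=(gap,i)) call, instead of A's loop that rescans the growing list with max() at every iteration.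
import Mathlib
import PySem

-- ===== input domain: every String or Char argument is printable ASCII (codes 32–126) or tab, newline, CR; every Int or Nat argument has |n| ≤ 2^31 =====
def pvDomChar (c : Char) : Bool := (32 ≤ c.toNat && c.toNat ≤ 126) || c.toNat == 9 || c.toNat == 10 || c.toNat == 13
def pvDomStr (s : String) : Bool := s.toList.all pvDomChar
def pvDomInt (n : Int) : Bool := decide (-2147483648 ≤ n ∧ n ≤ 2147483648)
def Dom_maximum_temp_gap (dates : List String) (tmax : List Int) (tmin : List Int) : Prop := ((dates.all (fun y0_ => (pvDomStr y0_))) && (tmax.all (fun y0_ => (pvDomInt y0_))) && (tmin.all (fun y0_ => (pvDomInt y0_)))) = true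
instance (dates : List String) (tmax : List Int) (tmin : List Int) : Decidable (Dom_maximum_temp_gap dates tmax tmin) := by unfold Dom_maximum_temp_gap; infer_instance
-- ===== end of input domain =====

-- B replaces A's per-iteration max() rescan of the growing gap list by one gap-building
-- pass followed by a single argmax (key (gap, index), last-maximal tie-break): faster (O(n) vs O(n^2)).


-- ===== PORT A =====
-- loop body of A: append the gap, remember the index whenever the gap equals max(list so far)
def stepA (tmax tmin : List Int) (st : List Int × Option Int) (i : Int) : List Int × Option Int :=
  let temp_gap := PySem.List.pyGetD tmax i 0 - PySem.List.pyGetD tmin i 0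
  let lst := st.1 ++ [temp_gap]
  let p := if some temp_gap = PySem.List.max? lst (fun y => y) then some i else st.2
  (lst, p)

-- p unbound (empty input) is modeled by Option; the 'none' fallback is excluded by Pre_ (UnboundLocalError)
def maximum_temp_gap (dates : List String) (tmax : List Int) (tmin : List Int) : String × Int :=
  let length : Int := (dates.length : Int)
  let st := (PySem.List.pyRange 0 length 1).foldl (stepA tmax tmin) ([], none)
  match st.2 with
  | some p => (PySem.List.pyGetD dates p "", (PySem.List.max? st.1 (fun y => y)).getD 0)
  | none => ("", 0)

-- ===== PORT B =====
-- port of Python's max(range(len(g)), key=lambda i: (g[i], i)): keep the best index, replace on a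
-- lexicographically strictly greater key
def stepB (g : List Int) (best : Option Int) (i : Int) : Option Int :=
  match best with
  | none => some i
  | some b =>
      if PySem.List.pyGetD g b 0 < PySem.List.pyGetD g i 0 ∨
         (PySem.List.pyGetD g i 0 = PySem.List.pyGetD g b 0 ∧ b < i)
      then some i else some b

-- the 'none' fallback is the empty-range case, excluded by Pre_ (Python B raises ValueError there)
def maximum_temp_gap_alt (dates : List String) (tmax : List Int) (tmin : List Int) : String × Int :=
  let g := (PySem.List.pyRange 0 (dates.length : Int) 1).map
    (fun i => PySem.List.pyGetD tmax i 0 - PySem.List.pyGetD tmin i 0)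
  let p? := (PySem.List.pyRange 0 (g.length : Int) 1).foldl (stepB g) none
  match p? with
  | some p => (PySem.List.pyGetD dates p "", PySem.List.pyGetD g p 0)
  | none => ("", 0)

-- ===== PRECONDITION & SPEC =====
-- Pre_ excludes exactly the inputs where Python A raises: empty dates (UnboundLocalError on dates[p])
-- and dates longer than tmax or tmin (IndexError).
def Pre_maximum_temp_gap (dates : List String) (tmax : List Int) (tmin : List Int) : Prop :=
  dates ≠ [] ∧ dates.length ≤ tmax.length ∧ dates.length ≤ tmin.length
instance (dates : List String) (tmax : List Int) (tmin : List Int) : Decidable (Pre_maximum_temp_gap dates tmax tmin) := by unfold Pre_maximum_temp_gap; infer_instance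

def pvWitness_maximum_temp_gap : List String × List Int × List Int := (["a", "b"], [3, 5], [1, 1])

def Spec_maximum_temp_gap (dates : List String) (tmax : List Int) (tmin : List Int) (out : String × Int) : Prop := out = maximum_temp_gap_alt dates tmax tmin
instance (dates : List String) (tmax : List Int) (tmin : List Int) (out : String × Int) : Decidable (Spec_maximum_temp_gap dates tmax tmin out) := by unfold Spec_maximum_temp_gap; infer_instance

-- ===== CLAIM (what is proved, stated in full; the proofs are below) =====
def Claim_equal_maximum_temp_gap : Prop := ∀ (dates : List String) (tmax : List Int) (tmin : List Int), Dom_maximum_temp_gap dates tmax tmin → Pre_maximum_temp_gap dates tmax tmin → Spec_maximum_temp_gap dates tmax tmin (maximum_temp_gap dates tmax tmin)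

-- ===== LEMMAS AND PROOFS =====

theorem max?_id_append_singleton (l : List Int) (x : Int) :
    PySem.List.max? (l ++ [x]) (fun y => y) =
      some (match PySem.List.max? l (fun y => y) with
            | none => x
            | some m => max m x) := by
  cases l with
  | nil => simp [PySem.List.max?]
  | cons h t =>
      simp [PySem.List.max?_id_cons, List.foldl_append]

-- The joint loop invariant: after the first k iterations, A's list is the k-prefix of B's gap list,
-- A's index equals B's, and (for k > 0) the tracked index b is < k with max(list) = g[b].
theorem loop_inv (tmax tmin : List Int) (n : Nat) (G : List Int)
    (hG : G = (PySem.List.pyRange 0 (n : Int) 1).map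
      (fun i => PySem.List.pyGetD tmax i 0 - PySem.List.pyGetD tmin i 0))
    (k : Nat) (hk : k ≤ n) :
    ((PySem.List.pyRange 0 (k : Int) 1).foldl (stepA tmax tmin) ([], none)).1
        = (PySem.List.pyRange 0 (k : Int) 1).map
            (fun i => PySem.List.pyGetD tmax i 0 - PySem.List.pyGetD tmin i 0) ∧
    ((PySem.List.pyRange 0 (k : Int) 1).foldl (stepA tmax tmin) ([], none)).2
        = (PySem.List.pyRange 0 (k : Int) 1).foldl (stepB G) none ∧
    (k = 0 → (PySem.List.pyRange 0 (k : Int) 1).foldl (stepB G) none = none) ∧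
    (0 < k → ∃ b : Nat,
      (PySem.List.pyRange 0 (k : Int) 1).foldl (stepB G) none = some (b : Int) ∧ b < k ∧
      PySem.List.max? (((PySem.List.pyRange 0 (k : Int) 1).foldl (stepA tmax tmin) ([], none)).1)
        (fun y => y) = some (PySem.List.pyGetD G (b : Int) 0)) := by
  induction k with
  | zero => simp [PySem.List.pyRange_one_eq_nil]
  | succ k ih =>
      have hk' : k ≤ n := Nat.le_of_succ_le hk
      obtain ⟨h1, h2, h3, h4⟩ := ih hk'
      have hsplit : PySem.List.pyRange 0 ((k + 1 : Nat) : Int) 1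
          = PySem.List.pyRange 0 (k : Int) 1 ++ [(k : Int)] := by
        push_cast
        exact PySem.List.pyRange_one_succ_right (by positivity)
      have hGk : PySem.List.pyGetD G ((k : Nat) : Int) 0
          = PySem.List.pyGetD tmax (k : Int) 0 - PySem.List.pyGetD tmin (k : Int) 0 := by
        rw [hG]
        exact PySem.List.pyGetD_map_pyRange _ n k 0 (by omega)
      rw [hsplit]
      simp only [List.foldl_append, List.foldl_cons, List.foldl_nil, List.map_append,
        List.map_cons, List.map_nil]
      rcases Nat.eq_zero_or_pos k with hk0 | hk0
      · subst hk0
        have hA : (PySem.List.pyRange 0 ((0 : Nat) : Int) 1).foldl (stepA tmax tmin) ([], none)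
            = ([], none) := by
          simp [PySem.List.pyRange_one_eq_nil]
        have hBn : (PySem.List.pyRange 0 ((0 : Nat) : Int) 1).foldl (stepB G) none = none := h3 rfl
        rw [hA, hBn]
        simp only [stepA, stepB]
        refine ⟨by simp, ?_, by simp, ?_⟩
        · simp [PySem.List.max?]
        · intro _
          refine ⟨0, by simp, by omega, ?_⟩
          simp only [Nat.cast_zero] at hGk
          simp [PySem.List.max?, hGk]
      · obtain ⟨b, hB, hbk, hmax⟩ := h4 hk0
        have hA2 : ((PySem.List.pyRange 0 (k : Int) 1).foldl (stepA tmax tmin) ([], none)).2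
            = some (b : Int) := h2.trans hB
        rw [hB]
        simp only [stepA, stepB]
        rw [h1] at hmax
        rw [h1, hA2, max?_id_append_singleton, hmax]
        have hbi : (b : Int) < (k : Int) := by exact_mod_cast hbk
        set m := PySem.List.pyGetD G ((b : Nat) : Int) 0 with hm
        set tg := PySem.List.pyGetD tmax ((k : Nat) : Int) 0
          - PySem.List.pyGetD tmin ((k : Nat) : Int) 0 with htg
        by_cases hle : m ≤ tg
        · have hcA : some tg = some (max m tg) := by rw [max_eq_right hle]
          have hcB : PySem.List.pyGetD G (b : Int) 0 < PySem.List.pyGetD G (k : Int) 0 ∨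
              (PySem.List.pyGetD G (k : Int) 0 = PySem.List.pyGetD G (b : Int) 0 ∧ (b : Int) < (k : Int)) := by
            rw [hGk, ← hm]
            rcases lt_or_eq_of_le hle with h | h
            · exact Or.inl h
            · exact Or.inr ⟨h.symm, hbi⟩
          rw [if_pos hcA, if_pos hcB]
          refine ⟨rfl, rfl, by omega, ?_⟩
          intro _
          refine ⟨k, rfl, by omega, ?_⟩
          rw [hGk]
          simp [max_eq_right hle]
        · have hlt : tg < m := lt_of_not_ge hle
          have hcA : ¬ (some tg = some (max m tg)) := by
            rw [max_eq_left (le_of_lt hlt)]; intro h; injection h with h; omega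
          have hcB : ¬ (PySem.List.pyGetD G (b : Int) 0 < PySem.List.pyGetD G (k : Int) 0 ∨
              (PySem.List.pyGetD G (k : Int) 0 = PySem.List.pyGetD G (b : Int) 0 ∧ (b : Int) < (k : Int))) := by
            rw [hGk, ← hm]
            push Not
            exact ⟨le_of_lt hlt, fun h => absurd h (by omega)⟩
          rw [if_neg hcA, if_neg hcB]
          refine ⟨rfl, rfl, by omega, ?_⟩
          intro _
          refine ⟨b, rfl, by omega, ?_⟩
          rw [← hm]
          simp [max_eq_left (le_of_lt hlt)]

-- ===== VERDICT (by name: the statement is the Claim_ definition above) =====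
theorem maximum_temp_gap_spec : Claim_equal_maximum_temp_gap := by
  intro dates tmax tmin _ hpre
  obtain ⟨hne, _, _⟩ := hpre
  have hn : 0 < dates.length := List.length_pos_iff.mpr hne
  unfold Spec_maximum_temp_gap maximum_temp_gap maximum_temp_gap_alt
  set n := dates.length with hn'
  have hG : ((PySem.List.pyRange 0 (n : Int) 1).map
      (fun i => PySem.List.pyGetD tmax i 0 - PySem.List.pyGetD tmin i 0)).length = n := by
    simp [PySem.List.length_pyRange_one]
  obtain ⟨h1, h2, _, h4⟩ := loop_inv tmax tmin n _ rfl n (le_refl n)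
  obtain ⟨b, hB, hbn, hmax⟩ := h4 hn
  simp only [hG]
  rw [h2, hB, hmax]
  have hGb : PySem.List.pyGetD ((PySem.List.pyRange 0 (n : Int) 1).map
      (fun i => PySem.List.pyGetD tmax i 0 - PySem.List.pyGetD tmin i 0)) (b : Int) 0
      = PySem.List.pyGetD tmax (b : Int) 0 - PySem.List.pyGetD tmin (b : Int) 0 :=
    PySem.List.pyGetD_map_pyRange _ n b 0 hbn
  simp [hGb]
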